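-- pv_equiv track=rewrite | github.com/1r0nw1ll/quantum-arithmetic-research | qa_alphageometry_ptolemy/qa_orbit_resonance_attention_cert_v1/qa_orbit_resonance_attention_cert_validate.py | _attn_chromogeometry
-- ===== SOURCE A (Python) =====
-- def _attn_chromogeometry(tokens, m=9):
--     # Elements (C, F, G) computed RAW (d=b+e, a=b+2e RAW per 2026-04-09 rule).
--     # Mod m is applied only to the cross-pair bilinear equality test — that is
--     # a modular-equivalence comparison, not an element computation.
--     triples = []
--     for (b, e) in tokens:
--         d = b + e                # RAW
--         a = b + 2 * e            # RAW
--         C = 2 * d * e            # RAW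
--         F = b * a                # RAW
--         G = e * e + d * d        # RAW
--         triples.append((C, F, G))
--     n = len(tokens)
--     A = [[0] * n for _ in range(n)]
--     for i in range(n):
--         Ci, Fi, Gi = triples[i]
--         for j in range(n):
--             Cj, Fj, Gj = triples[j]
--             A[i][j] = 1 if (Ci * Cj + Fi * Fj) % m == (Gi * Gj) % m else 0
--     return A
-- ===== SOURCE B (Python) =====
-- def _attn_chromogeometry(tokens, m=9):
--     # Residue-class algorithm: the bilinear test only depends on the triples
--     # modulo m, so reduce each token to its residue signature, dedupe the
--     # signatures, evaluate the test once per pair of distinct signatures into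
--     # a table, and assemble the matrix by table lookup.
--     sigs = [((2 * (b + e) * e) % m,
--              (b * (b + 2 * e)) % m,
--              (e * e + (b + e) * (b + e)) % m)
--             for (b, e) in tokens]
--     classes = list(dict.fromkeys(sigs))
--     table = {s: {t: (1 if (s[0] * t[0] + s[1] * t[1]) % m == (s[2] * t[2]) % m else 0)
--                  for t in classes}
--              for s in classes}
--     return [[table[si][sj] for sj in sigs] for si in sigs]
-- ===== Notes on version B (the rewrite author's own statement) =====
-- stated objective: alternative
-- what changed: B replaces A's full n x n scan of raw bilinear tests by a residue-class algorithm: each token is reduced to its signature (C%m, F%m, G%m), the signatures are deduplicated via dict.fromkeys, the modular test is evaluated once per pair of DISTINCT signatures into a nested dictionary, and the matrix is assembled by pure table lookup, which is correct because the test depends on the triples only modulo m.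
import Mathlib
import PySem

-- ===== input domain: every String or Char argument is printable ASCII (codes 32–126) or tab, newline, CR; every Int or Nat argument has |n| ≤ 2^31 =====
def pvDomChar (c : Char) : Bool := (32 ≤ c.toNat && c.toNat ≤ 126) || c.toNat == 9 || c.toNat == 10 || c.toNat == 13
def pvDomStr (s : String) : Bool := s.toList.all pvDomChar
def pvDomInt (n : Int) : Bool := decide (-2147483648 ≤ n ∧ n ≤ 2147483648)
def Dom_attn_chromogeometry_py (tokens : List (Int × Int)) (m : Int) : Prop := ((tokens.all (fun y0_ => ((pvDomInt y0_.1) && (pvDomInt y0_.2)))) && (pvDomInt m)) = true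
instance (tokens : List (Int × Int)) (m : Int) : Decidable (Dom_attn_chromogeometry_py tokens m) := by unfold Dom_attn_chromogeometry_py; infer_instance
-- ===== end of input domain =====

-- B replaces A's full n×n scan of raw bilinear tests by a residue-class algorithm:
-- each token is reduced to its residue signature mod m, the distinct signatures are
-- deduplicated, the test is evaluated once per pair of distinct signatures into a
-- nested dictionary, and the matrix is assembled by table lookup.

-- A[i][j] = v on a list-of-lists matrix (used by port A's in-place updates)
def setE (M : List (List Int)) (i j : Nat) (v : Int) : List (List Int) :=
  M.set i ((M.getD i []).set j v)

-- ===== PORT A =====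
def attn_chromogeometry_py (tokens : List (Int × Int)) (m : Int) : List (List Int) :=
  let triples : List (Int × Int × Int) := tokens.foldl (fun acc be =>
    let b := be.1
    let e := be.2
    let d := b + e
    let a := b + 2 * e
    let C := 2 * d * e
    let F := b * a
    let G := e * e + d * d
    acc ++ [(C, F, G)]) []
  let n := tokens.length
  let A0 : List (List Int) := (List.range n).map (fun _ => List.replicate n 0)
  (List.range n).foldl (fun A i =>
    let t := triples.getD i (0, 0, 0)
    (List.range n).foldl (fun A j =>
      let u := triples.getD j (0, 0, 0)
      setE A i j (if PySem.Int.mod (t.1 * u.1 + t.2.1 * u.2.1) m = PySem.Int.mod (t.2.2 * u.2.2) m then 1 else 0)) A) A0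

-- ===== PORT B =====
-- residue signature of one token
def sigOf (m : Int) (be : Int × Int) : Int × Int × Int :=
  let b := be.1
  let e := be.2
  (PySem.Int.mod (2 * (b + e) * e) m,
   PySem.Int.mod (b * (b + 2 * e)) m,
   PySem.Int.mod (e * e + (b + e) * (b + e)) m)

-- the bilinear test on two signatures
def sigTest (m : Int) (s t : Int × Int × Int) : Int :=
  if PySem.Int.mod (s.1 * t.1 + s.2.1 * t.2.1) m = PySem.Int.mod (s.2.2 * t.2.2) m then 1 else 0

def attn_chromogeometry_py_alt (tokens : List (Int × Int)) (m : Int) : List (List Int) :=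
  let sigs := tokens.map (sigOf m)
  let classes := PySem.List.dedup sigs      -- list(dict.fromkeys(sigs))
  let table : PySem.Dict (Int × Int × Int) (PySem.Dict (Int × Int × Int) Int) :=
    classes.foldl (fun d s =>
      d.insert s (classes.foldl (fun r t => r.insert t (sigTest m s t)) PySem.Dict.empty))
      PySem.Dict.empty
  -- table[si][sj]: the keys are always present (si, sj ∈ sigs ⊆ classes), so the
  -- getD defaults are never taken and this is exactly Python's dict lookup
  sigs.map (fun si => sigs.map (fun sj => (table.getD si PySem.Dict.empty).getD sj 0))

-- ===== PRECONDITION & SPEC =====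
-- Pre_ excludes exactly m = 0 with nonempty tokens, where Python's '%' raises ZeroDivisionError.
def Pre_attn_chromogeometry_py (tokens : List (Int × Int)) (m : Int) : Prop :=
  tokens = [] ∨ m ≠ 0
instance (tokens : List (Int × Int)) (m : Int) : Decidable (Pre_attn_chromogeometry_py tokens m) := by unfold Pre_attn_chromogeometry_py; infer_instance
def pvWitness_attn_chromogeometry_py : (List (Int × Int)) × Int := ([(1, 2), (3, -1)], 9)

def Spec_attn_chromogeometry_py (tokens : List (Int × Int)) (m : Int) (out : List (List Int)) : Prop := out = attn_chromogeometry_py_alt tokens m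
instance (tokens : List (Int × Int)) (m : Int) (out : List (List Int)) : Decidable (Spec_attn_chromogeometry_py tokens m out) := by unfold Spec_attn_chromogeometry_py; infer_instance

-- ===== CLAIM (what is proved, stated in full; the proofs are below) =====
def Claim_equal_attn_chromogeometry_py : Prop := ∀ (tokens : List (Int × Int)) (m : Int), Dom_attn_chromogeometry_py tokens m → Pre_attn_chromogeometry_py tokens m → Spec_attn_chromogeometry_py tokens m (attn_chromogeometry_py tokens m)

-- ===== LEMMAS AND PROOFS =====

def getE (M : List (List Int)) (p q : Nat) : Int := (M.getD p []).getD q 0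

def Shape (M : List (List Int)) (n : Nat) : Prop :=
  M.length = n ∧ ∀ r ∈ M, r.length = n

lemma row_len {M : List (List Int)} {n p : Nat} (hs : Shape M n) (hp : p < n) :
    (M.getD p []).length = n := by
  obtain ⟨hl, hr⟩ := hs
  have hp' : p < M.length := by omega
  rw [List.getD_eq_getElem M [] hp']
  exact hr _ (List.getElem_mem hp')

lemma shape_setE {M : List (List Int)} {n i j : Nat} (v : Int)
    (hs : Shape M n) (hi : i < n) : Shape (setE M i j v) n := by
  obtain ⟨hl, hr⟩ := hs
  refine ⟨by simp [setE, hl], ?_⟩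
  intro r hrm
  rcases List.mem_or_eq_of_mem_set hrm with h | h
  · exact hr _ h
  · subst h; rw [List.length_set]; exact row_len ⟨hl, hr⟩ hi

lemma getE_setE {M : List (List Int)} {n i j : Nat} (v : Int) (p q : Nat)
    (hs : Shape M n) (hi : i < n) (hj : j < n) :
    getE (setE M i j v) p q = if p = i ∧ q = j then v else getE M p q := by
  have hiM : i < M.length := by rw [hs.1]; omega
  have hjR : j < (M.getD i []).length := by rw [row_len hs hi]; omega
  rw [List.getD_eq_getElem?_getD] at hjR
  simp only [getE, setE, List.getD_eq_getElem?_getD, List.getElem?_set]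
  by_cases hp : p = i
  · subst hp
    rw [if_pos rfl, if_pos hiM, Option.getD_some, List.getElem?_set]
    by_cases hq : q = j
    · subst hq
      simp [hjR]
    · simp [Ne.symm hq, hq]
  · rw [if_neg (fun h => hp h.symm), if_neg (fun h => hp h.1)]

lemma mat_eq {M M' : List (List Int)} {n : Nat}
    (hs : Shape M n) (hs' : Shape M' n)
    (h : ∀ p q, p < n → q < n → getE M p q = getE M' p q) : M = M' := by
  obtain ⟨hl, hr⟩ := hs
  obtain ⟨hl', hr'⟩ := hs'
  apply List.ext_getElem (by omega)
  intro p hp hp'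
  have hpn : p < n := by omega
  apply List.ext_getElem
  · rw [hr _ (List.getElem_mem hp), hr' _ (List.getElem_mem hp')]
  · intro q hq hq'
    have hqn : q < n := by rw [hr _ (List.getElem_mem hp)] at hq; omega
    have := h p q hpn hqn
    rwa [getE, getE, List.getD_eq_getElem M [] hp, List.getD_eq_getElem M' [] hp',
      List.getD_eq_getElem _ 0 hq, List.getD_eq_getElem _ 0 hq'] at this

-- inner loop of A: row i gets f i · at every index in Js
lemma innerA (f : Nat → Nat → Int) {n : Nat} (i : Nat) (hi : i < n) :
    ∀ (Js : List Nat) (M : List (List Int)), Shape M n → (∀ j ∈ Js, j < n) →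
    Shape (Js.foldl (fun A j => setE A i j (f i j)) M) n ∧
    ∀ p q, getE (Js.foldl (fun A j => setE A i j (f i j)) M) p q =
      if p = i ∧ q ∈ Js then f i q else getE M p q := by
  intro Js
  induction Js with
  | nil => intro M hs _; simpa using hs
  | cons j rest ih =>
    intro M hs hJ
    have hj : j < n := hJ j (by simp)
    have hs1 : Shape (setE M i j (f i j)) n := shape_setE _ hs hi
    obtain ⟨ihs, ihv⟩ := ih (setE M i j (f i j)) hs1 (fun x hx => hJ x (by simp [hx]))
    refine ⟨by simpa using ihs, ?_⟩
    intro p q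
    simp only [List.foldl_cons]
    rw [ihv p q, getE_setE _ p q hs hi hj]
    by_cases hp : p = i
    · subst hp
      by_cases hr : q ∈ rest
      · simp [hr]
      · by_cases hq : q = j
        · subst hq; simp [hr]
        · simp [hr, hq]
    · simp [hp]

-- outer loop of A over range' a k (a + k = n): turns a zeros-below-row-a matrix into the full f matrix
lemma outerA (f : Nat → Nat → Int) {n : Nat} :
    ∀ (k a : Nat) (M : List (List Int)), a + k = n → Shape M n →
    (∀ p q, p < n → q < n → getE M p q = if p < a then f p q else 0) →
    Shape ((List.range' a k).foldl (fun A i => (List.range n).foldl (fun A j => setE A i j (f i j)) A) M) n ∧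
    ∀ p q, p < n → q < n →
      getE ((List.range' a k).foldl (fun A i => (List.range n).foldl (fun A j => setE A i j (f i j)) A) M) p q = f p q := by
  intro k
  induction k with
  | zero =>
    intro a M hak hs hM
    refine ⟨by simpa using hs, ?_⟩
    intro p q hp hq
    have h := hM p q hp hq
    rw [if_pos (by omega)] at h
    simpa using h
  | succ k ih =>
    intro a M hak hs hM
    have ha : a < n := by omega
    obtain ⟨hs1, hv1⟩ := innerA f a ha (List.range n) M hs (by simp)
    have hM1 : ∀ p q, p < n → q < n →
        getE ((List.range n).foldl (fun A j => setE A a j (f a j)) M) p q =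
        if p < a + 1 then f p q else 0 := by
      intro p q hp hq
      rw [hv1 p q]
      by_cases hpa : p = a
      · simp [hpa, List.mem_range, hq, show a < a + 1 by omega]
      · rw [if_neg (by simp [hpa]), hM p q hp hq]
        by_cases h : p < a
        · rw [if_pos h, if_pos (by omega)]
        · rw [if_neg h, if_neg (by omega)]
    have := ih (a + 1) _ (by omega) hs1 hM1
    simpa [List.range'_succ] using this

lemma M0_shape (n : Nat) : Shape ((List.range n).map (fun _ => List.replicate n 0)) n := by
  refine ⟨by simp, ?_⟩
  intro r hr
  obtain ⟨x, _, hx⟩ := List.mem_map.mp hr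
  simp [← hx]

lemma M0_getE (n : Nat) (p q : Nat) (hp : p < n) :
    getE ((List.range n).map (fun _ => List.replicate n 0)) p q = 0 := by
  have : ((List.range n).map (fun _ => List.replicate n (0 : Int))).getD p [] = List.replicate n 0 := by
    rw [List.getD_eq_getElem _ _ (by simp [hp])]
    simp
  simp only [getE, this, List.getD_eq_getElem?_getD, List.getElem?_replicate]
  by_cases h : q < n <;> simp [h]

-- A's raw triple for one token
def rawOf (be : Int × Int) : Int × Int × Int :=
  let b := be.1
  let e := be.2
  let d := b + e
  let a := b + 2 * e
  (2 * d * e, b * a, e * e + d * d)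

lemma trA_eq_map (tokens : List (Int × Int)) :
    tokens.foldl (fun acc be =>
      let b := be.1
      let e := be.2
      let d := b + e
      let a := b + 2 * e
      let C := 2 * d * e
      let F := b * a
      let G := e * e + d * d
      acc ++ [(C, F, G)]) [] = tokens.map rawOf := by
  rw [PySem.List.foldl_append_singleton_eq_map, List.nil_append]
  rfl

-- the per-pair bilinear test, as A computes it from the raw triples
def testf (m : Int) (tr : List (Int × Int × Int)) (i j : Nat) : Int :=
  let t := tr.getD i (0, 0, 0)
  let u := tr.getD j (0, 0, 0)
  if PySem.Int.mod (t.1 * u.1 + t.2.1 * u.2.1) m = PySem.Int.mod (t.2.2 * u.2.2) m then 1 else 0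

-- characterization of A's result
lemma portA_char (tokens : List (Int × Int)) (m : Int) :
    Shape (attn_chromogeometry_py tokens m) tokens.length ∧
    ∀ p q, p < tokens.length → q < tokens.length →
      getE (attn_chromogeometry_py tokens m) p q = testf m (tokens.map rawOf) p q := by
  have h := outerA (f := testf m (tokens.map rawOf)) (n := tokens.length) tokens.length 0
    ((List.range tokens.length).map (fun _ => List.replicate tokens.length 0)) (by omega)
    (M0_shape _) (fun p q hp hq => by rw [M0_getE _ p q hp, if_neg (by omega)])
  have hrw : attn_chromogeometry_py tokens m =
      (List.range' 0 tokens.length).foldl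
        (fun A i => (List.range tokens.length).foldl
          (fun A j => setE A i j (testf m (tokens.map rawOf) i j)) A)
        ((List.range tokens.length).map (fun _ => List.replicate tokens.length 0)) := by
    simp only [attn_chromogeometry_py, trA_eq_map, ← List.range_eq_range']
    rfl
  rw [hrw]
  exact h

-- Python mod is constant on congruence classes (any m; for m = 0 divisibility forces a = b)
lemma mod_congr (m a b : Int) (h : m ∣ a - b) :
    PySem.Int.mod a m = PySem.Int.mod b m := by
  rcases eq_or_ne m 0 with hm | hm
  · subst hm
    have : a = b := by
      have := Int.zero_dvd.mp h
      omega
    rw [this]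
  · have ha := PySem.Int.floordiv_mul_add_mod a m
    have hb := PySem.Int.floordiv_mul_add_mod b m
    have hd : m ∣ (PySem.Int.mod a m - PySem.Int.mod b m) := by
      obtain ⟨k, hk⟩ := h
      exact ⟨k - PySem.Int.floordiv a m + PySem.Int.floordiv b m, by linarith⟩
    rcases lt_or_gt_of_ne hm with hneg | hpos
    · have h1 := PySem.Int.mod_neg_bounds a hneg
      have h2 := PySem.Int.mod_neg_bounds b hneg
      have hd' : -m ∣ (PySem.Int.mod a m - PySem.Int.mod b m) := neg_dvd.mpr hd
      have := Int.eq_zero_of_abs_lt_dvd hd' (by rw [abs_lt]; omega)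
      omega
    · have h1 := PySem.Int.mod_nonneg a hpos
      have h2 := PySem.Int.mod_nonneg b hpos
      have h3 := PySem.Int.mod_lt a hpos
      have h4 := PySem.Int.mod_lt b hpos
      have := Int.eq_zero_of_abs_lt_dvd hd (by rw [abs_lt]; omega)
      omega

lemma mod_sub_self_dvd (m a : Int) : m ∣ (PySem.Int.mod a m - a) := by
  have := PySem.Int.floordiv_mul_add_mod a m
  exact ⟨-(PySem.Int.floordiv a m), by linarith⟩

lemma mod_mul_sub_dvd (m a b : Int) :
    m ∣ (PySem.Int.mod a m * PySem.Int.mod b m - a * b) := by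
  obtain ⟨k1, hk1⟩ := mod_sub_self_dvd m a
  obtain ⟨k2, hk2⟩ := mod_sub_self_dvd m b
  exact ⟨k1 * PySem.Int.mod b m + a * k2, by linear_combination (PySem.Int.mod b m) * hk1 + a * hk2⟩

-- the signature test on the residues equals the raw test
lemma sigTest_eq (m : Int) (x y : Int × Int × Int) :
    sigTest m (PySem.Int.mod x.1 m, PySem.Int.mod x.2.1 m, PySem.Int.mod x.2.2 m)
              (PySem.Int.mod y.1 m, PySem.Int.mod y.2.1 m, PySem.Int.mod y.2.2 m) =
    (if PySem.Int.mod (x.1 * y.1 + x.2.1 * y.2.1) m = PySem.Int.mod (x.2.2 * y.2.2) m then 1 else 0) := by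
  have h1 : PySem.Int.mod (PySem.Int.mod x.1 m * PySem.Int.mod y.1 m +
      PySem.Int.mod x.2.1 m * PySem.Int.mod y.2.1 m) m =
      PySem.Int.mod (x.1 * y.1 + x.2.1 * y.2.1) m := by
    apply mod_congr
    have hsplit : PySem.Int.mod x.1 m * PySem.Int.mod y.1 m +
        PySem.Int.mod x.2.1 m * PySem.Int.mod y.2.1 m - (x.1 * y.1 + x.2.1 * y.2.1) =
        (PySem.Int.mod x.1 m * PySem.Int.mod y.1 m - x.1 * y.1) +
        (PySem.Int.mod x.2.1 m * PySem.Int.mod y.2.1 m - x.2.1 * y.2.1) := by ring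
    rw [hsplit]
    exact dvd_add (mod_mul_sub_dvd m x.1 y.1) (mod_mul_sub_dvd m x.2.1 y.2.1)
  have h2 : PySem.Int.mod (PySem.Int.mod x.2.2 m * PySem.Int.mod y.2.2 m) m =
      PySem.Int.mod (x.2.2 * y.2.2) m := by
    exact mod_congr _ _ _ (mod_mul_sub_dvd m x.2.2 y.2.2)
  simp only [sigTest, h1, h2]

-- a dict built by inserting (t, f t) over a Nodup list: looking up a member gives f
lemma getD_foldl_insert_fn {κ ν : Type} [BEq κ] [LawfulBEq κ]
    (cl : List κ) (f : κ → ν) (d0 : ν) (s : κ) (hnd : cl.Nodup) (hs : s ∈ cl) :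
    (cl.foldl (fun d t => d.insert t (f t)) PySem.Dict.empty).getD s d0 = f s := by
  have hitems := PySem.Dict.items_foldl_insert_fresh (l := cl) (k := fun t => t) (v := f)
    (d := PySem.Dict.empty) (by simp [PySem.Dict.contains_empty]) (by simpa using hnd)
  have hkeys : (cl.foldl (fun d t => d.insert t (f t)) PySem.Dict.empty).keys.Nodup :=
    PySem.Dict.nodup_keys_foldl_insert cl (fun _ t => f t) PySem.Dict.empty (by simp)
  refine PySem.Dict.getD_of_mem_items _ ?_ hkeys d0
  rw [hitems]
  simp only [List.mem_append, List.mem_map]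
  exact Or.inr ⟨s, hs, rfl⟩

-- characterization of B's result
lemma portB_char (tokens : List (Int × Int)) (m : Int) :
    Shape (attn_chromogeometry_py_alt tokens m) tokens.length ∧
    ∀ p q, p < tokens.length → q < tokens.length →
      getE (attn_chromogeometry_py_alt tokens m) p q =
        sigTest m (sigOf m (tokens.getD p (0, 0))) (sigOf m (tokens.getD q (0, 0))) := by
  simp only [attn_chromogeometry_py_alt]
  set sigs := tokens.map (sigOf m) with hsigs
  set classes := PySem.List.dedup sigs with hcl
  have hnd : classes.Nodup := by rw [hcl]; exact PySem.List.nodup_dedup sigs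
  have hmem : ∀ s ∈ sigs, s ∈ classes := fun s h => by
    rw [hcl]; exact (PySem.List.mem_dedup sigs s).mpr h
  set table := classes.foldl (fun d s =>
      d.insert s (classes.foldl (fun r t => r.insert t (sigTest m s t)) PySem.Dict.empty))
      PySem.Dict.empty with htb
  have hlook : ∀ s ∈ sigs, ∀ t ∈ sigs,
      (table.getD s PySem.Dict.empty).getD t 0 = sigTest m s t := by
    intro s hsm t htm
    rw [htb, getD_foldl_insert_fn classes
      (fun s => classes.foldl (fun r t => r.insert t (sigTest m s t)) PySem.Dict.empty)
      PySem.Dict.empty s hnd (hmem s hsm),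
      getD_foldl_insert_fn classes (fun t => sigTest m s t) 0 t hnd (hmem t htm)]
  constructor
  · refine ⟨by simp [hsigs], ?_⟩
    intro r hr
    obtain ⟨x, _, hx⟩ := List.mem_map.mp hr
    simp [← hx, hsigs]
  · intro p q hp hq
    have hps : p < sigs.length := by simp [hsigs]; omega
    have hqs : q < sigs.length := by simp [hsigs]; omega
    have hrow : (sigs.map (fun si => sigs.map (fun sj =>
        (table.getD si PySem.Dict.empty).getD sj 0))).getD p [] =
        sigs.map (fun sj => (table.getD (sigs[p]) PySem.Dict.empty).getD sj 0) := by
      rw [List.getD_eq_getElem _ _ (by simpa using hps)]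
      simp
    simp only [getE, hrow]
    rw [List.getD_eq_getElem _ _ (by simpa using hqs)]
    simp only [List.getElem_map]
    rw [hlook _ (List.getElem_mem hps) _ (List.getElem_mem hqs)]
    have hp' : sigs[p] = sigOf m (tokens.getD p (0, 0)) := by
      simp [hsigs, List.getD_eq_getElem?_getD, List.getElem?_eq_getElem hp]
    have hq' : sigs[q] = sigOf m (tokens.getD q (0, 0)) := by
      simp [hsigs, List.getD_eq_getElem?_getD, List.getElem?_eq_getElem hq]
    rw [hp', hq']

-- A's raw test at (p, q) is B's signature test on the residues
lemma testf_eq_sigTest (tokens : List (Int × Int)) (m : Int) (p q : Nat)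
    (hp : p < tokens.length) (hq : q < tokens.length) :
    testf m (tokens.map rawOf) p q =
      sigTest m (sigOf m (tokens.getD p (0, 0))) (sigOf m (tokens.getD q (0, 0))) := by
  have hps : (tokens.map rawOf).getD p (0, 0, 0) = rawOf (tokens.getD p (0, 0)) := by
    rw [List.getD_eq_getElem _ _ (by simpa using hp),
      List.getD_eq_getElem tokens (0, 0) hp]
    simp
  have hqs : (tokens.map rawOf).getD q (0, 0, 0) = rawOf (tokens.getD q (0, 0)) := by
    rw [List.getD_eq_getElem _ _ (by simpa using hq),
      List.getD_eq_getElem tokens (0, 0) hq]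
    simp
  have := sigTest_eq m (rawOf (tokens.getD p (0, 0))) (rawOf (tokens.getD q (0, 0)))
  simp only [testf, hps, hqs, sigOf, rawOf] at *
  exact this.symm

-- ===== VERDICT (by name: the statement is the Claim_ definition above) =====
theorem attn_chromogeometry_py_spec : Claim_equal_attn_chromogeometry_py := by
  intro tokens m _ _
  show attn_chromogeometry_py tokens m = attn_chromogeometry_py_alt tokens m
  obtain ⟨hsA, hvA⟩ := portA_char tokens m
  obtain ⟨hsB, hvB⟩ := portB_char tokens m
  exact mat_eq hsA hsB (fun p q hp hq => by
    rw [hvA p q hp hq, hvB p q hp hq, testf_eq_sigTest tokens m p q hp hq])
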